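-- pv_equiv track=rewrite | github.com/TeodoraLazaroiu/FMI-Materials | Testarea Sistemelor Software/cursuri/Curs 7/7. bit_count/main.py | low_common_bits
-- ===== SOURCE A (Python) =====
-- def low_common_bits(a, b):
-- 	mask = 1
-- 	output = 0
-- 	for i in range(64):
-- 		if (a & mask) == (b & mask):
-- 			output |= a & mask
-- 		else:
-- 			output |= mask
-- 			return output
-- 		mask <<= 1
-- 	return output
-- ===== SOURCE B (Python) =====
-- def low_common_bits(a, b):
--     M = (1 << 64) - 1
--     diff = (a ^ b) & M
--     if diff == 0:
--         return a & M
--     lsb = diff & -diff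
--     return (a & (lsb - 1)) | lsb
-- ===== Notes on version B (the rewrite author's own statement) =====
-- stated objective: simpler
-- what changed: Replaces the 64-iteration per-bit scan with a closed form: mask a^b to the low 64 bits, isolate its lowest set bit with diff & -diff, and assemble the result as (a & (lsb-1)) | lsb (or a & mask when the low 64 bits agree).
import Mathlib
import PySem

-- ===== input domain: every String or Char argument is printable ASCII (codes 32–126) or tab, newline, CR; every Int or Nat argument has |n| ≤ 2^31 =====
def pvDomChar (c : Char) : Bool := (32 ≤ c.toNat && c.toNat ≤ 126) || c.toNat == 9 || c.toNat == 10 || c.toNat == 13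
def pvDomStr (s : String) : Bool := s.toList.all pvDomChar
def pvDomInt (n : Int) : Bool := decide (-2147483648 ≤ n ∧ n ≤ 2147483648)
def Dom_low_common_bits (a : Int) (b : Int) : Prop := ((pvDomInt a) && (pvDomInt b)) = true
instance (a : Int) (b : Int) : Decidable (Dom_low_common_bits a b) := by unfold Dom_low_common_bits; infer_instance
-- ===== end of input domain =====

-- B replaces A's 64-step per-bit scan by a closed form: mask (a^b) to 64 bits, isolate its lowest
-- set bit with diff & -diff, and assemble the answer with two bitwise operations (objective: simpler).
-- Int.land/lor/xor/shiftLeft are exact ports of Python's &, |, ^, << on int (two's complement);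
-- all shift amounts here are the literal nonnegative constants 1 and 64.

-- ===== PORT A =====
-- the for-loop over range(64) with its early return, as structural recursion on the remaining count
def lcbLoop (a b : Int) : Nat → Int → Int → Int
  | 0, _mask, output => output
  | n + 1, mask, output =>
    if Int.land a mask = Int.land b mask then
      lcbLoop a b n (Int.shiftLeft mask 1) (Int.lor output (Int.land a mask))
    else
      Int.lor output mask

def low_common_bits (a : Int) (b : Int) : Int := lcbLoop a b 64 1 0

-- ===== PORT B =====
def low_common_bits_alt (a : Int) (b : Int) : Int :=
  let M : Int := Int.shiftLeft 1 64 - 1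
  let diff : Int := Int.land (Int.xor a b) M
  if diff = 0 then Int.land a M
  else
    let lsb : Int := Int.land diff (-diff)
    Int.lor (Int.land a (lsb - 1)) lsb

-- ===== PRECONDITION & SPEC =====
def Spec_low_common_bits (a : Int) (b : Int) (out : Int) : Prop := out = low_common_bits_alt a b
instance (a : Int) (b : Int) (out : Int) : Decidable (Spec_low_common_bits a b out) := by unfold Spec_low_common_bits; infer_instance

-- ===== CLAIM (what is proved, stated in full; the proofs are below) =====
def Claim_equal_low_common_bits : Prop := ∀ (a : Int) (b : Int), Dom_low_common_bits a b → Spec_low_common_bits a b (low_common_bits a b)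

-- ===== LEMMAS AND PROOFS =====

-- testBit-level toolkit ------------------------------------------------------

theorem tbCoe (n k : ℕ) : Int.testBit (Int.ofNat n) k = n.testBit k := rfl

theorem tbNegSucc (n k : ℕ) : Int.testBit (Int.negSucc n) k = !(n.testBit k) := rfl

-- two integers with the same bits (two's complement) are equal
theorem intExt {m n : Int} (h : ∀ k, m.testBit k = n.testBit k) : m = n := by
  have big : ∀ x e : ℕ, x ≤ e → x.testBit (e+1) = false := fun x e hx =>
    Nat.testBit_lt_two_pow (lt_of_le_of_lt (hx.trans (Nat.le_succ e)) Nat.lt_two_pow_self)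
  cases m with
  | ofNat m =>
    cases n with
    | ofNat n =>
      exact congrArg Int.ofNat (Nat.eq_of_testBit_eq fun i => h i)
    | negSucc n =>
      exfalso
      have h1 := h (m + n + 1)
      rw [tbCoe, tbNegSucc, big m (m+n) (by omega), big n (m+n) (by omega)] at h1
      simp at h1
  | negSucc m =>
    cases n with
    | ofNat n =>
      exfalso
      have h1 := h (m + n + 1)
      rw [tbCoe, tbNegSucc, big n (m+n) (by omega), big m (m+n) (by omega)] at h1
      simp at h1
    | negSucc n =>
      have : m = n := Nat.eq_of_testBit_eq fun i => by
        have h1 := h i; rw [tbNegSucc, tbNegSucc] at h1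
        exact Bool.not_inj h1
      rw [this]

theorem tbPow (i k : ℕ) : Int.testBit ((2:Int)^i) k = decide (i = k) := by
  have : ((2:Int)^i) = Int.ofNat (2^i) := rfl
  rw [this, tbCoe, Nat.testBit_two_pow]

theorem tbZero (k : ℕ) : Int.testBit 0 k = false := by
  show Int.testBit (Int.ofNat 0) k = false
  rw [tbCoe, Nat.zero_testBit]

-- a window of n one-bits starting at position i
def seg (i n : ℕ) : Int := Int.ofNat ((2^n - 1) <<< i)

theorem tbSeg (i n k : ℕ) : (seg i n).testBit k = decide (i ≤ k ∧ k < i + n) := by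
  rw [seg, tbCoe, Nat.testBit_shiftLeft, Nat.testBit_two_pow_sub_one, Bool.eq_iff_iff]
  simp only [Bool.and_eq_true, decide_eq_true_eq, ge_iff_le]
  omega

theorem shiftPow (i : ℕ) : Int.shiftLeft ((2:Int)^i) 1 = (2:Int)^(i+1) := by
  have h1 : ((2:Int)^i) = Int.ofNat (2^i) := rfl
  have h2 : ((2:Int)^(i+1)) = Int.ofNat (2^(i+1)) := rfl
  rw [h1, h2]
  show Int.ofNat (2^i <<< 1) = Int.ofNat (2^(i+1))
  rw [Nat.shiftLeft_eq]
  ring_nf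

theorem landPowEq (a b : Int) (i : ℕ) :
    Int.land a ((2:Int)^i) = Int.land b ((2:Int)^i) ↔ a.testBit i = b.testBit i := by
  constructor
  · intro h
    have := congrArg (fun x => Int.testBit x i) h
    simpa [Int.testBit_land, tbPow] using this
  · intro h
    apply intExt
    intro k
    rw [Int.testBit_land, Int.testBit_land, tbPow]
    by_cases hik : i = k
    · subst hik; simp [h]
    · simp [hik]

-- the loop when a and b agree on all inspected bits --------------------------
theorem loop_agree (a b : Int) : ∀ (n i : ℕ) (output : Int),
    (∀ j, i ≤ j → j < i + n → a.testBit j = b.testBit j) →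
    lcbLoop a b n ((2:Int)^i) output = Int.lor output (Int.land a (seg i n)) := by
  intro n
  induction n with
  | zero =>
    intro i output _
    apply intExt; intro k
    simp [lcbLoop, Int.testBit_lor, Int.testBit_land, tbSeg]
  | succ n ih =>
    intro i output hagree
    have hbit : a.testBit i = b.testBit i := hagree i le_rfl (by omega)
    rw [lcbLoop, if_pos ((landPowEq a b i).mpr hbit), shiftPow,
        ih (i+1) _ (fun j h1 h2 => hagree j (by omega) (by omega))]
    apply intExt; intro k
    simp only [Int.testBit_lor, Int.testBit_land, tbSeg, tbPow]
    cases ha : a.testBit k <;> cases ho : output.testBit k <;>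
      by_cases h1 : i = k <;> by_cases h2 : i + 1 ≤ k ∧ k < i + 1 + n <;>
      by_cases h3 : i ≤ k ∧ k < i + (n+1) <;> simp [h1, h2, h3] <;> omega

-- the loop when the first disagreement is at bit k ---------------------------
theorem loop_diff (a b : Int) : ∀ (n i k : ℕ) (output : Int),
    i ≤ k → k < i + n → a.testBit k ≠ b.testBit k →
    (∀ j, i ≤ j → j < k → a.testBit j = b.testBit j) →
    lcbLoop a b n ((2:Int)^i) output =
      Int.lor output (Int.lor (Int.land a (seg i (k - i))) ((2:Int)^k)) := by
  intro n
  induction n with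
  | zero => intro i k output h1 h2 _ _; omega
  | succ n ih =>
    intro i k output h1 h2 hne hagree
    by_cases hik : i = k
    · subst hik
      rw [lcbLoop, if_neg (fun hc => hne ((landPowEq a b i).mp hc))]
      apply intExt; intro k'
      simp only [Int.testBit_lor, Int.testBit_land, tbSeg, tbPow]
      cases output.testBit k' <;> cases a.testBit k' <;>
        by_cases h3 : i = k' <;> simp [h3] <;> omega
    · have hbit : a.testBit i = b.testBit i := hagree i le_rfl (by omega)
      rw [lcbLoop, if_pos ((landPowEq a b i).mpr hbit), shiftPow,
          ih (i+1) k _ (by omega) (by omega) hne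
            (fun j ha hb => hagree j (by omega) hb)]
      apply intExt; intro k'
      simp only [Int.testBit_lor, Int.testBit_land, tbSeg, tbPow]
      cases ha : a.testBit k' <;> cases ho : output.testBit k' <;>
        by_cases h3 : i + 1 ≤ k' ∧ k' < i + 1 + (k - (i+1)) <;>
        by_cases h4 : i ≤ k' ∧ k' < i + (k - i) <;>
        by_cases h5 : i = k' <;> by_cases h6 : k = k' <;>
        simp [h3, h4, h5, h6] <;> omega

-- the low-64-bit mask --------------------------------------------------------
theorem tbM (k : ℕ) : Int.testBit (Int.shiftLeft 1 64 - 1) k = decide (k < 64) := by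
  have : (Int.shiftLeft 1 64 - 1) = Int.ofNat (2^64 - 1) := by
    show (Int.ofNat (1 <<< 64) - 1 : Int) = Int.ofNat (2^64 - 1)
    rw [Nat.shiftLeft_eq]
    norm_num
  rw [this, tbCoe, Nat.testBit_two_pow_sub_one]

-- lowest set bit: if nd's lowest one-bit is at position k, then nd & -nd = 2^k
theorem lsb_eq (nd k : ℕ) (hk : nd.testBit k = true)
    (hlow : ∀ j, j < k → nd.testBit j = false) :
    Int.land (Int.ofNat nd) (-(Int.ofNat nd)) = (2:Int)^k := by
  have hnd0 : nd ≠ 0 := fun h => by rw [h, Nat.zero_testBit] at hk; exact Bool.false_ne_true hk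
  obtain ⟨m, rfl⟩ : ∃ m, nd = m + 1 := ⟨nd - 1, by omega⟩
  rw [show -(Int.ofNat (m+1)) = Int.negSucc m from rfl]
  apply intExt
  intro j
  rw [Int.testBit_land, tbCoe, tbNegSucc, tbPow]
  rcases lt_trichotomy j k with hj | hj | hj
  · -- below the lowest set bit: nd's bit is 0
    rw [hlow j hj]
    simp
    omega
  · -- at the lowest set bit: nd's bit is 1 and (nd-1)'s bit is 0
    subst hj
    have hpos : 0 < (2:ℕ)^j := Nat.two_pow_pos j
    have hmod : (m+1) % 2^j = 0 := by
      apply Nat.eq_of_testBit_eq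
      intro i
      rw [Nat.testBit_mod_two_pow, Nat.zero_testBit]
      by_cases hi : i < j
      · simp [hi, hlow i hi]
      · simp [hi]
    obtain ⟨q, hqe⟩ : ∃ q, m + 1 = 2^j * q :=
      ⟨(m+1)/2^j, by have := Nat.div_add_mod (m+1) (2^j); omega⟩
    have hqd : (m+1) / 2^j = q := by rw [hqe, Nat.mul_div_cancel_left _ hpos]
    have hqodd : q % 2 = 1 := by
      rw [Nat.testBit_eq_decide_div_mod_eq, hqd, decide_eq_true_eq] at hk
      exact hk
    obtain ⟨q', rfl⟩ : ∃ q', q = q' + 1 := ⟨q - 1, by omega⟩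
    have hqe' : m + 1 = 2^j * q' + 2^j := by rw [hqe]; ring
    have hdiv : m / 2^j = q' := by
      conv_lhs => rw [show m = 2^j * q' + (2^j - 1) from by omega]
      rw [Nat.mul_add_div hpos, Nat.div_eq_of_lt (show (2:ℕ)^j - 1 < 2^j by omega)]
      omega
    have hmt : m.testBit j = false := by
      rw [Nat.testBit_eq_decide_div_mod_eq, hdiv]
      simp
      omega
    rw [hk, hmt]
    simp
  · -- above the lowest set bit: nd-1 and nd share the bit, x && !x = false
    have hpos : 0 < (2:ℕ)^j := Nat.two_pow_pos j
    have hge : 2^k ≤ (m+1) % 2^j := by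
      by_contra hc
      have h2 : ((m+1) % 2^j).testBit k = false := Nat.testBit_lt_two_pow (by omega)
      rw [Nat.testBit_mod_two_pow, hk] at h2
      simp [hj] at h2
    have h2k : 1 ≤ (2:ℕ)^k := Nat.one_le_two_pow
    have hdm := Nat.div_add_mod (m+1) (2^j)
    have hmlt : (m+1) % 2^j < 2^j := Nat.mod_lt _ hpos
    have hm2 : m = 2^j * ((m+1)/2^j) + ((m+1) % 2^j - 1) := by
      obtain ⟨w, hw⟩ : ∃ w, 2^j * ((m+1)/2^j) = w := ⟨_, rfl⟩
      rw [hw] at hdm ⊢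
      omega
    have hdiv : m / 2^j = (m+1) / 2^j := by
      conv_lhs => rw [hm2]
      rw [Nat.mul_add_div hpos, Nat.div_eq_of_lt (show (m+1) % 2^j - 1 < 2^j by omega)]
      omega
    have hsame : m.testBit j = (m+1).testBit j := by
      rw [Nat.testBit_eq_decide_div_mod_eq, Nat.testBit_eq_decide_div_mod_eq, hdiv]
    rw [hsame]
    cases h : (m+1).testBit j <;> simp <;> omega

theorem Mcoe : (Int.shiftLeft 1 64 - 1 : Int) = Int.ofNat (2^64 - 1) := by
  show (Int.ofNat (1 <<< 64) - 1 : Int) = Int.ofNat (2^64 - 1)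
  rw [Nat.shiftLeft_eq]
  norm_num

-- main equivalence -----------------------------------------------------------
theorem main_eq (a b : Int) : low_common_bits a b = low_common_bits_alt a b := by
  rw [low_common_bits, low_common_bits_alt]
  dsimp only
  have td : ∀ kk, (Int.land (Int.xor a b) (Int.shiftLeft 1 64 - 1)).testBit kk =
      ((a.testBit kk).xor (b.testBit kk) && decide (kk < 64)) := by
    intro kk
    rw [Int.testBit_land, Int.testBit_lxor, tbM]
  have hone : (1 : Int) = (2:Int)^0 := by norm_num
  by_cases hall : ∀ j, j < 64 → a.testBit j = b.testBit j
  · -- no disagreement in the low 64 bits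
    have hd0 : Int.land (Int.xor a b) (Int.shiftLeft 1 64 - 1) = 0 := by
      apply intExt
      intro kk
      rw [td, tbZero]
      by_cases h : kk < 64
      · simp [h, hall kk h]
      · simp [h]
    rw [if_pos hd0]
    conv_lhs => rw [hone]
    rw [loop_agree a b 64 0 0 (fun j _ h2 => hall j (by omega))]
    apply intExt
    intro kk
    rw [Int.testBit_lor, Int.testBit_land, Int.testBit_land, tbZero, tbSeg, tbM]
    cases a.testBit kk <;> by_cases h : kk < 64 <;> simp [h] <;> omega
  · -- first disagreement at bit k
    push Not at hall
    have hex : ∃ j, j < 64 ∧ a.testBit j ≠ b.testBit j := hall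
    set k := Nat.find hex with hkdef
    obtain ⟨hk64, hkne⟩ := Nat.find_spec hex
    rw [← hkdef] at hk64 hkne
    have hmin : ∀ j, j < k → a.testBit j = b.testBit j := by
      intro j hj
      have := Nat.find_min hex hj
      by_contra hc
      exact this ⟨by omega, hc⟩
    have hx : (a.testBit k).xor (b.testBit k) = true := by
      revert hkne
      cases a.testBit k <;> cases b.testBit k <;> simp
    have htk : (Int.land (Int.xor a b) (Int.shiftLeft 1 64 - 1)).testBit k = true := by
      rw [td, hx]
      simp [hk64]
    have hdne : Int.land (Int.xor a b) (Int.shiftLeft 1 64 - 1) ≠ 0 := by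
      intro hc
      rw [hc, tbZero] at htk
      exact Bool.false_ne_true htk
    rw [if_neg hdne]
    obtain ⟨nd, hnd⟩ : ∃ nd : ℕ,
        Int.land (Int.xor a b) (Int.shiftLeft 1 64 - 1) = Int.ofNat nd := by
      rw [Mcoe]
      cases Int.xor a b with
      | ofNat x => exact ⟨_, rfl⟩
      | negSucc x => exact ⟨_, rfl⟩
    have hndk : nd.testBit k = true := by rw [← tbCoe, ← hnd]; exact htk
    have hndlow : ∀ j, j < k → nd.testBit j = false := by
      intro j hj
      rw [← tbCoe, ← hnd, td, hmin j hj]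
      cases b.testBit j <;> simp
    rw [hnd, lsb_eq nd k hndk hndlow]
    have hpow1 : ((2:Int)^k - 1) = Int.ofNat (2^k - 1) := by
      have h1 : 1 ≤ (2:ℕ)^k := Nat.one_le_two_pow
      show ((2:Int)^k - 1) = ((2^k - 1 : ℕ) : Int)
      rw [Nat.cast_sub h1]
      push_cast
      ring
    conv_lhs => rw [hone]
    rw [loop_diff a b 64 0 k 0 (by omega) (by omega) hkne (fun j _ hj => hmin j hj)]
    apply intExt
    intro kk
    rw [Int.testBit_lor, Int.testBit_lor, Int.testBit_lor, Int.testBit_land,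
        Int.testBit_land, tbZero, tbSeg, tbPow, hpow1, tbCoe,
        Nat.testBit_two_pow_sub_one]
    cases a.testBit kk <;> by_cases h1 : kk < k <;> by_cases h2 : k = kk <;>
      simp [h1, h2] <;> omega

-- ===== VERDICT (by name: the statement is the Claim_ definition above) =====
theorem low_common_bits_spec : Claim_equal_low_common_bits := by
  intro a b _
  show low_common_bits a b = low_common_bits_alt a b
  exact main_eq a b
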